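-- pv_equiv track=rewrite | github.com/S0jer/algorithms-and-data-structures-course-2021 | ASD/Egzaminy/Egzamin/2019_20_T2Z3.py | T_to_G
-- ===== SOURCE A (Python) =====
-- def T_to_G(T):
--     n = len(T)
--     G = [[-1] * n for _ in range(n)]
--
--     for i in range(n):
--         for j in range(n):
--             if i != j and T[i][j] == 1:
--                 G[i][j] = 1
--             elif i != j and T[i][j] == 2:
--                 G[j][i] = 1
--             elif i != j and T[i][j] == 0:
--                 G[i][j] = 1
--                 G[j][i] = 1
--
--     return G
-- ===== SOURCE B (Python) =====
-- def T_to_G(T):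
--     n = len(T)
--     # Pass 1: scan only the upper triangle (i < j) and collect the directed
--     # edges each unordered pair contributes.
--     edges = []
--     for i in range(n):
--         for j in range(i + 1, n):
--             a, b = T[i][j], T[j][i]
--             if a in (0, 1) or b in (0, 2):
--                 edges.append((i, j))
--             if a in (0, 2) or b in (0, 1):
--                 edges.append((j, i))
--     edge_set = set(edges)
--     # Pass 2: materialize the adjacency matrix from the edge set.
--     return [[1 if (i, j) in edge_set else -1 for j in range(n)]
--             for i in range(n)]
-- ===== Notes on version B (the rewrite author's own statement) =====
-- stated objective: alternative
-- what changed: A scatters 1-writes into a mutable n*n matrix, revisiting each ordered pair from both sides; B is a staged two-pass algorithm: a single upper-triangle scan (i<j) collects the directed edges into an edge set, then the matrix is materialized from edge-set membership.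
import Mathlib
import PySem

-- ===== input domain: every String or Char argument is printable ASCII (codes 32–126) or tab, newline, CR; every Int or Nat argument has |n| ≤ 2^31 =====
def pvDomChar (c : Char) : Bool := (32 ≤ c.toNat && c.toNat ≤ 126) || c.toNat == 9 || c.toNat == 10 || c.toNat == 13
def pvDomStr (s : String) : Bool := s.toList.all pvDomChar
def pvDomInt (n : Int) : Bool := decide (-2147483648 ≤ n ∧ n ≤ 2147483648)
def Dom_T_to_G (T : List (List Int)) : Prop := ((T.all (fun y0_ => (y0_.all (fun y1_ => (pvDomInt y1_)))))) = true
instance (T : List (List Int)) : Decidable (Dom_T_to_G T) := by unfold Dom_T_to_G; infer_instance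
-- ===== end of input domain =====

-- B replaces A's scatter of 1-writes into a mutable matrix by a staged algorithm: one
-- upper-triangle scan collects the directed edges into a set, then the matrix is built
-- from edge-set membership; objective: alternative (same cost, no in-place mutation).


-- ===== PORT A =====
-- reading T[i][j] (always in range under Pre_T_to_G; getD 0 is a dummy default never used there)
def tCell (T : List (List Int)) (i j : Nat) : Int := (T.getD i []).getD j 0

-- G[p][q] = v (List.set; out-of-range writes cannot occur under Pre_T_to_G)
def setCell (G : List (List Int)) (p q : Nat) (v : Int) : List (List Int) :=
  G.set p ((G.getD p []).set q v)

def stepA (T : List (List Int)) (i : Nat) (G : List (List Int)) (j : Nat) : List (List Int) :=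
  if i ≠ j ∧ tCell T i j = 1 then setCell G i j 1
  else if i ≠ j ∧ tCell T i j = 2 then setCell G j i 1
  else if i ≠ j ∧ tCell T i j = 0 then setCell (setCell G i j 1) j i 1
  else G

def T_to_G (T : List (List Int)) : List (List Int) :=
  let n := T.length
  let G0 := List.replicate n (List.replicate n (-1 : Int))
  (List.range n).foldl (fun G i => (List.range n).foldl (stepA T i) G) G0

-- ===== PORT B =====
-- one iteration of B's inner loop body: maybe append (i,j), then maybe append (j,i)
def stepB (T : List (List Int)) (i : Nat) (E : List (Nat × Nat)) (j : Nat) : List (Nat × Nat) :=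
  let a := tCell T i j
  let b := tCell T j i
  let E1 := if (a = 0 ∨ a = 1) ∨ (b = 0 ∨ b = 2) then E ++ [(i, j)] else E
  if (a = 0 ∨ a = 2) ∨ (b = 0 ∨ b = 1) then E1 ++ [(j, i)] else E1

def T_to_G_alt (T : List (List Int)) : List (List Int) :=
  let n := T.length
  let edges := (List.range n).foldl
    (fun E i => (List.range' (i + 1) (n - (i + 1))).foldl (stepB T i) E) []
  let edgeSet := PySem.Set.ofList edges
  (List.range n).map (fun i => (List.range n).map (fun j =>
    if (i, j) ∈ edgeSet then (1 : Int) else -1))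

-- ===== PRECONDITION & SPEC =====
-- Pre_ excludes exactly the ragged inputs on which A raises IndexError: row i must have length
-- ≥ n, except the last row, where length ≥ n-1 suffices (the diagonal read is short-circuited).
def Pre_T_to_G (T : List (List Int)) : Prop :=
  ∀ i : Nat, i < T.length →
    (if i + 1 = T.length then T.length - 1 else T.length) ≤ (T.getD i []).length
instance (T : List (List Int)) : Decidable (Pre_T_to_G T) := by unfold Pre_T_to_G; infer_instance

def pvWitness_T_to_G : List (List Int) := [[9, 1, 2], [0, 9, 3], [2, 0, 9]]

def Spec_T_to_G (T : List (List Int)) (out : List (List Int)) : Prop := out = T_to_G_alt T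
instance (T : List (List Int)) (out : List (List Int)) : Decidable (Spec_T_to_G T out) := by unfold Spec_T_to_G; infer_instance

-- ===== CLAIM (what is proved, stated in full; the proofs are below) =====
def Claim_equal_T_to_G : Prop := ∀ (T : List (List Int)), Dom_T_to_G T → Pre_T_to_G T → Spec_T_to_G T (T_to_G T)

-- ===== LEMMAS AND PROOFS =====

-- which cells the loop body of A at (i,j) writes 1 into
abbrev Writes (T : List (List Int)) (i j p q : Nat) : Prop :=
  i ≠ j ∧ ((p = i ∧ q = j ∧ (tCell T i j = 1 ∨ tCell T i j = 0)) ∨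
           (p = j ∧ q = i ∧ (tCell T i j = 2 ∨ tCell T i j = 0)))

-- which pairs the loop body of B at (i,j), i < j, appends to the edge list
abbrev AddB (T : List (List Int)) (i j p q : Nat) : Prop :=
  (p = i ∧ q = j ∧ ((tCell T i j = 0 ∨ tCell T i j = 1) ∨ (tCell T j i = 0 ∨ tCell T j i = 2))) ∨
  (p = j ∧ q = i ∧ ((tCell T i j = 0 ∨ tCell T i j = 2) ∨ (tCell T j i = 0 ∨ tCell T j i = 1)))

def Shape (n : Nat) (G : List (List Int)) : Prop :=
  G.length = n ∧ ∀ r ∈ G, r.length = n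

def cell (G : List (List Int)) (p q : Nat) : Int := (G.getD p []).getD q 0

theorem shape_setCell {n : Nat} {G : List (List Int)} (h : Shape n G) (p q : Nat) (v : Int) :
    Shape n (setCell G p q v) := by
  obtain ⟨hl, hr⟩ := h
  by_cases hp : p < G.length
  · refine ⟨by simp [setCell, hl], ?_⟩
    intro r hrmem
    rcases List.mem_or_eq_of_mem_set hrmem with h1 | h1
    · exact hr r h1
    · subst h1
      simp only [List.length_set]
      have hrow : G.getD p [] = G[p] := by
        rw [List.getD_eq_getElem?_getD, List.getElem?_eq_getElem hp]; rfl
      rw [hrow]; exact hr _ (List.getElem_mem _)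
  · unfold setCell
    rw [List.set_eq_of_length_le (by omega)]
    exact ⟨hl, hr⟩

theorem cell_setCell (G : List (List Int)) (p q : Nat) (v : Int) (a b : Nat) :
    cell (setCell G p q v) a b =
      if a = p ∧ b = q ∧ p < G.length ∧ q < (G.getD p []).length then v else cell G a b := by
  unfold cell setCell
  by_cases hp : p < G.length
  · have hrow : G.getD p [] = G[p] := by
      rw [List.getD_eq_getElem?_getD, List.getElem?_eq_getElem hp]; rfl
    rw [hrow]
    by_cases hap : a = p
    · subst hap
      have h1 : (G.set a (G[a].set q v)).getD a [] = G[a].set q v := by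
        rw [List.getD_eq_getElem?_getD, List.getElem?_set_self (by simpa using hp)]; rfl
      rw [h1]
      by_cases hbq : b = q
      · subst hbq
        by_cases hq : b < G[a].length
        · rw [List.getD_eq_getElem?_getD, List.getElem?_set_self (by simpa using hq)]
          simp [hp, hq]
        · rw [List.getD_eq_getElem?_getD, List.getElem?_set, if_pos rfl,
            if_neg (by simpa using hq)]
          rw [if_neg (by rintro ⟨-, -, -, h⟩; exact hq h)]
          rw [hrow, List.getD_eq_getElem?_getD,
            List.getElem?_eq_none (show G[a].length ≤ b by omega)]
      · rw [List.getD_eq_getElem?_getD, List.getElem?_set_ne (fun h => hbq h.symm),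
          ← List.getD_eq_getElem?_getD, hrow]
        rw [if_neg (by rintro ⟨-, h, -⟩; exact hbq h)]
    · have h2 : (G.set p (G[p].set q v)).getD a [] = G.getD a [] := by
        rw [List.getD_eq_getElem?_getD, List.getElem?_set_ne (fun h => hap h.symm),
          ← List.getD_eq_getElem?_getD]
      rw [h2]; simp [hap]
  · rw [List.set_eq_of_length_le (by omega)]
    simp [hp]

theorem cell_shape_setCell {n : Nat} {G : List (List Int)} (h : Shape n G)
    (p q : Nat) (hp : p < n) (hq : q < n) (v : Int) (a b : Nat) :
    cell (setCell G p q v) a b = if a = p ∧ b = q then v else cell G a b := by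
  obtain ⟨hl, hr⟩ := h
  have hrow : (G.getD p []).length = n := by
    simp only [List.getD_eq_getElem?_getD,
      List.getElem?_eq_getElem (show p < G.length by omega), Option.getD_some]
    exact hr _ (List.getElem_mem _)
  rw [cell_setCell]
  by_cases hab : a = p ∧ b = q
  · rw [if_pos ⟨hab.1, hab.2, by omega, by omega⟩, if_pos hab]
  · rw [if_neg (by rintro ⟨h1, h2, -⟩; exact hab ⟨h1, h2⟩), if_neg hab]

theorem step_cell {n : Nat} (T : List (List Int)) {G : List (List Int)} (h : Shape n G)
    (i j : Nat) (hi : i < n) (hj : j < n) (a b : Nat) :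
    cell (stepA T i G j) a b = if Writes T i j a b then 1 else cell G a b := by
  unfold stepA Writes
  by_cases hij : i = j
  · simp [hij]
  · by_cases h1 : tCell T i j = 1
    · rw [if_pos ⟨hij, h1⟩, cell_shape_setCell h i j hi hj]
      have : tCell T i j ≠ 2 := by rw [h1]; decide
      have h0 : tCell T i j ≠ 0 := by rw [h1]; decide
      by_cases hab : a = i ∧ b = j
      · simp [hab, hij, h1]
      · simp only [if_neg hab]
        rw [if_neg]
        rintro ⟨_, ⟨ha, hb, _⟩ | ⟨ha, hb, hc⟩⟩
        · exact hab ⟨ha, hb⟩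
        · rcases hc with hc | hc
          · exact this hc
          · exact h0 hc
    · by_cases h2 : tCell T i j = 2
      · rw [if_neg (by rintro ⟨_, hc⟩; exact h1 hc), if_pos ⟨hij, h2⟩,
          cell_shape_setCell h j i hj hi]
        have h0 : tCell T i j ≠ 0 := by rw [h2]; decide
        by_cases hab : a = j ∧ b = i
        · simp [hab, hij, h2]
        · simp only [if_neg hab]
          rw [if_neg]
          rintro ⟨_, ⟨ha, hb, hc⟩ | ⟨ha, hb, _⟩⟩
          · rcases hc with hc | hc
            · exact h1 hc
            · exact h0 hc
          · exact hab ⟨ha, hb⟩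
      · by_cases h0 : tCell T i j = 0
        · rw [if_neg (by rintro ⟨_, hc⟩; exact h1 hc), if_neg (by rintro ⟨_, hc⟩; exact h2 hc),
            if_pos ⟨hij, h0⟩,
            cell_shape_setCell (shape_setCell h i j 1) j i hj hi,
            cell_shape_setCell h i j hi hj]
          by_cases hab1 : a = j ∧ b = i
          · simp [hab1, hij, h0]
          · simp only [if_neg hab1]
            by_cases hab2 : a = i ∧ b = j
            · simp [hab2, hij, h0]
            · simp only [if_neg hab2]
              rw [if_neg]
              rintro ⟨_, ⟨ha, hb, _⟩ | ⟨ha, hb, _⟩⟩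
              · exact hab2 ⟨ha, hb⟩
              · exact hab1 ⟨ha, hb⟩
        · rw [if_neg (by rintro ⟨_, hc⟩; exact h1 hc), if_neg (by rintro ⟨_, hc⟩; exact h2 hc),
            if_neg (by rintro ⟨_, hc⟩; exact h0 hc)]
          rw [if_neg]
          rintro ⟨_, ⟨_, _, hc | hc⟩ | ⟨_, _, hc | hc⟩⟩
          · exact h1 hc
          · exact h0 hc
          · exact h2 hc
          · exact h0 hc

theorem shape_stepA {n : Nat} (T : List (List Int)) {G : List (List Int)} (h : Shape n G)
    (i j : Nat) : Shape n (stepA T i G j) := by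
  unfold stepA
  split_ifs <;>
    first
    | exact h
    | exact shape_setCell h _ _ _
    | exact shape_setCell (shape_setCell h _ _ _) _ _ _

theorem inner_cell {n : Nat} (T : List (List Int)) (i : Nat) (hi : i < n)
    (L : List Nat) (hL : ∀ j ∈ L, j < n) :
    ∀ (G : List (List Int)), Shape n G → ∀ (a b : Nat),
      cell (L.foldl (stepA T i) G) a b =
        if ∃ j ∈ L, Writes T i j a b then 1 else cell G a b := by
  induction L with
  | nil => intro G _ a b; simp
  | cons j L ih =>
    intro G hG a b
    have hj := hL j (by simp)
    have hL' : ∀ x ∈ L, x < n := fun x hx => hL x (by simp [hx])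
    simp only [List.foldl_cons, List.exists_mem_cons_iff]
    rw [ih hL' _ (shape_stepA T hG i j), step_cell T hG i j hi hj]
    by_cases hw : Writes T i j a b <;> by_cases hex : ∃ x ∈ L, Writes T i x a b <;>
      simp [hw, hex]

theorem shape_inner {n : Nat} (T : List (List Int)) (i : Nat) (L : List Nat) :
    ∀ (G : List (List Int)), Shape n G → Shape n (L.foldl (stepA T i) G) := by
  induction L with
  | nil => intro G hG; exact hG
  | cons j L ih => intro G hG; exact ih _ (shape_stepA T hG i j)

theorem outer_cell {n : Nat} (T : List (List Int))
    (L : List Nat) (hL : ∀ i ∈ L, i < n) :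
    ∀ (G : List (List Int)), Shape n G → ∀ (a b : Nat),
      cell (L.foldl (fun G i => (List.range n).foldl (stepA T i) G) G) a b =
        if ∃ i ∈ L, ∃ j ∈ List.range n, Writes T i j a b then 1 else cell G a b := by
  induction L with
  | nil => intro G _ a b; simp
  | cons i L ih =>
    intro G hG a b
    have hi := hL i (by simp)
    have hL' : ∀ x ∈ L, x < n := fun x hx => hL x (by simp [hx])
    simp only [List.foldl_cons, List.exists_mem_cons_iff]
    rw [ih hL' _ (shape_inner T i _ _ hG),
      inner_cell T i hi (List.range n) (by simp) G hG]
    simp only [List.mem_range]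
    by_cases hw : ∃ j < n, Writes T i j a b <;>
      by_cases hex : ∃ x ∈ L, ∃ j < n, Writes T x j a b <;>
        simp [hw, hex]

-- A writes cell (a,b) at some iteration iff B's gather condition holds at (a,b)
theorem writes_iff (T : List (List Int)) (n : Nat) (a b : Nat)
    (ha : a < n) (hb : b < n) :
    (∃ i ∈ List.range n, ∃ j ∈ List.range n, Writes T i j a b) ↔
      (a ≠ b ∧ ((tCell T a b = 0 ∨ tCell T a b = 1) ∨ (tCell T b a = 0 ∨ tCell T b a = 2))) := by
  constructor
  · rintro ⟨i, -, j, -, hij, ⟨ha', hb', hc⟩ | ⟨ha', hb', hc⟩⟩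
    · subst ha'; subst hb'; exact ⟨hij, Or.inl hc.symm⟩
    · subst ha'; subst hb'; exact ⟨Ne.symm hij, Or.inr hc.symm⟩
  · rintro ⟨hab, hc | hc⟩
    · exact ⟨a, by simp [ha], b, by simp [hb], hab,
        Or.inl ⟨rfl, rfl, hc.elim (fun h => Or.inr h) (fun h => Or.inl h)⟩⟩
    · exact ⟨b, by simp [hb], a, by simp [ha], Ne.symm hab,
        Or.inr ⟨rfl, rfl, hc.symm⟩⟩

theorem cell_replicate (n : Nat) (a b : Nat) (ha : a < n) (hb : b < n) :
    cell (List.replicate n (List.replicate n (-1 : Int))) a b = -1 := by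
  simp [cell, List.getD_eq_getElem?_getD, ha, hb]

theorem shape_replicate (n : Nat) :
    Shape n (List.replicate n (List.replicate n (-1 : Int))) := by
  constructor
  · simp
  · intro r hr
    rw [List.eq_of_mem_replicate hr]
    simp

theorem shape_T_to_G (T : List (List Int)) : Shape T.length (T_to_G T) := by
  show Shape T.length ((List.range T.length).foldl
    (fun G i => (List.range T.length).foldl (stepA T i) G)
    (List.replicate T.length (List.replicate T.length (-1))))
  exact (List.range T.length).foldlRecOn _ (shape_replicate T.length)
    (fun G hG i _ => shape_inner T i _ _ hG)

theorem cell_T_to_G (T : List (List Int)) (a b : Nat) (ha : a < T.length) (hb : b < T.length) :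
    cell (T_to_G T) a b =
      if a ≠ b ∧ ((tCell T a b = 0 ∨ tCell T a b = 1) ∨ (tCell T b a = 0 ∨ tCell T b a = 2))
      then 1 else -1 := by
  unfold T_to_G
  rw [outer_cell T (List.range T.length) (by simp) _ (shape_replicate T.length) a b,
    cell_replicate T.length a b ha hb]
  simp only [writes_iff T T.length a b ha hb]

-- B-side: membership in one inner-loop step of B
theorem mem_stepB (T : List (List Int)) (i j : Nat) (E : List (Nat × Nat)) (p q : Nat) :
    (p, q) ∈ stepB T i E j ↔ (p, q) ∈ E ∨ AddB T i j p q := by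
  by_cases h1 : (tCell T i j = 0 ∨ tCell T i j = 1) ∨ (tCell T j i = 0 ∨ tCell T j i = 2) <;>
    by_cases h2 : (tCell T i j = 0 ∨ tCell T i j = 2) ∨ (tCell T j i = 0 ∨ tCell T j i = 1) <;>
      simp [stepB, AddB, h1, h2, Prod.ext_iff]

theorem mem_innerB (T : List (List Int)) (i : Nat) (L : List Nat) (p q : Nat) :
    ∀ (E : List (Nat × Nat)),
      ((p, q) ∈ L.foldl (stepB T i) E ↔ (p, q) ∈ E ∨ ∃ j ∈ L, AddB T i j p q) := by
  induction L with
  | nil => intro E; simp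
  | cons j L ih =>
    intro E
    simp only [List.foldl_cons, List.exists_mem_cons_iff]
    rw [ih, mem_stepB]
    exact or_assoc

theorem mem_edges (T : List (List Int)) (n : Nat) (L : List Nat) (p q : Nat) :
    ∀ (E : List (Nat × Nat)),
      ((p, q) ∈ L.foldl (fun E i => (List.range' (i + 1) (n - (i + 1))).foldl (stepB T i) E) E ↔
        (p, q) ∈ E ∨ ∃ i ∈ L, ∃ j ∈ List.range' (i + 1) (n - (i + 1)), AddB T i j p q) := by
  induction L with
  | nil => intro E; simp
  | cons i L ih =>
    intro E
    simp only [List.foldl_cons, List.exists_mem_cons_iff]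
    rw [ih, mem_innerB]
    exact or_assoc

-- the edge list of B holds (a,b) iff the gather condition holds at (a,b)
theorem edges_iff (T : List (List Int)) (n a b : Nat) (ha : a < n) (hb : b < n) :
    (∃ i ∈ List.range n, ∃ j ∈ List.range' (i + 1) (n - (i + 1)), AddB T i j a b) ↔
      (a ≠ b ∧ ((tCell T a b = 0 ∨ tCell T a b = 1) ∨ (tCell T b a = 0 ∨ tCell T b a = 2))) := by
  constructor
  · rintro ⟨i, hi, j, hj, hadd⟩
    simp only [List.mem_range] at hi
    have hj' : i + 1 ≤ j ∧ j < i + 1 + (n - (i + 1)) := List.mem_range'_1.mp hj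
    have hij : i < j := by omega
    rcases hadd with ⟨ha', hb', hc⟩ | ⟨ha', hb', hc⟩
    · subst ha'; subst hb'; exact ⟨by omega, hc⟩
    · subst ha'; subst hb'; exact ⟨by omega, by tauto⟩
  · rintro ⟨hab, hc⟩
    rcases Nat.lt_or_ge a b with hlt | hge
    · refine ⟨a, by simp [ha], b, List.mem_range'_1.mpr ⟨by omega, by omega⟩, Or.inl ⟨rfl, rfl, hc⟩⟩
    · have hlt : b < a := by omega
      refine ⟨b, by simp [hb], a, List.mem_range'_1.mpr ⟨by omega, by omega⟩, Or.inr ⟨rfl, rfl, by tauto⟩⟩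

theorem pvIteCongr {c d : Prop} [Decidable c] [Decidable d] (h : c ↔ d) :
    (if c then (1 : Int) else -1) = if d then 1 else -1 := by simp [h]

-- ===== VERDICT (by name: the statement is the Claim_ definition above) =====
theorem T_to_G_spec : Claim_equal_T_to_G := by
  intro T _ _
  unfold Spec_T_to_G T_to_G_alt
  simp only []
  have hsh := shape_T_to_G T
  apply List.ext_getElem
  · simp [hsh.1]
  · intro a h1 h2
    have ha : a < T.length := hsh.1 ▸ h1
    have hrow : (T_to_G T)[a].length = T.length := hsh.2 _ (List.getElem_mem _)
    apply List.ext_getElem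
    · simp [hrow]
    · intro b hb1 hb2
      have hb : b < T.length := hrow ▸ hb1
      have hcell : cell (T_to_G T) a b = (T_to_G T)[a][b] := by
        unfold cell
        have h3 : (T_to_G T).getD a [] = (T_to_G T)[a] := by
          rw [List.getD_eq_getElem?_getD (l := T_to_G T), List.getElem?_eq_getElem h1]; rfl
        rw [h3, List.getD_eq_getElem?_getD, List.getElem?_eq_getElem hb1]; rfl
      rw [← hcell, cell_T_to_G T a b ha hb]
      simp only [List.getElem_map, List.getElem_range]
      refine pvIteCongr ?_
      rw [PySem.Set.mem_ofList, mem_edges]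
      simp only [List.not_mem_nil, false_or]
      exact (edges_iff T T.length a b ha hb).symm
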